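-- pv_equiv track=rewrite | github.com/kcnti/2110101-com-prog | grader/07_strfile/32.py | letter_sequence
-- ===== SOURCE A (Python) =====
-- def letter_sequence(t):
--     import string
--     alphabet = string.ascii_lowercase
--     rev_alphabet = alphabet[::-1]
--     for i in range(len(t)-3):
--         if t[i:i+4].lower() in alphabet or t[i:i+4].lower() in rev_alphabet:
--             return True
--     return False
-- ===== SOURCE B (Python) =====
-- def _low(o):
--     return o + 32 if 65 <= o <= 90 else o
--
-- def letter_sequence(t):
--     cs = [_low(ord(ch)) for ch in t]
--     for i in range(len(cs) - 3):
--         a, b, c, d = cs[i], cs[i + 1], cs[i + 2], cs[i + 3]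
--         if 97 <= a <= 122 and 97 <= d <= 122 and b - a == c - b == d - c and (b - a == 1 or b - a == -1):
--             return True
--     return False
-- ===== Notes on version B (the rewrite author's own statement) =====
-- stated objective: idiomatic
-- what changed: Replaces the per-window lowercase-the-slice plus substring-membership test against the alphabet and reversed-alphabet strings by a single lowering pass to ordinals followed by a per-window ord() arithmetic check (all three consecutive differences equal and +1 or -1).
import Mathlib
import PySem

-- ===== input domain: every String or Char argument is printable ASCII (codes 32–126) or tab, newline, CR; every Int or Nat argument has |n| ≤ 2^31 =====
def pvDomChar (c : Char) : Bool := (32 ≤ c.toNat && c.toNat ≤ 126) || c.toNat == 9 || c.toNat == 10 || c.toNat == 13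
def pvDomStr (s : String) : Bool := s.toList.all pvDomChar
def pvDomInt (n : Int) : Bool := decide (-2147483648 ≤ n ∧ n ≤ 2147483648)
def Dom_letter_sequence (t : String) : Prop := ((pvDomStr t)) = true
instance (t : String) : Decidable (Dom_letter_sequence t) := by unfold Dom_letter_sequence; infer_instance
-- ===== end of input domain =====

-- B replaces A's lowercase-the-slice + substring-membership test against the alphabet and
-- reversed-alphabet strings by one lowering pass to ordinals and a per-window ±1-difference
-- check (idiomatic ord() arithmetic; no speed claim).

-- ===== PORT A =====
def pvAlpha : List Char := "abcdefghijklmnopqrstuvwxyz".toList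
-- rev_alphabet = alphabet[::-1]
def pvRevAlpha : List Char := (PySem.List.slice? pvAlpha none none (-1)).getD []

def letter_sequence (t : String) : Bool :=
  (PySem.List.pyRange 0 ((t.toList.length : Int) - 3) 1).any fun i =>
    let w := PySem.Chars.lower (PySem.List.slice t.toList (some i) (some (i + 4)))
    PySem.Chars.isIn w pvAlpha || PySem.Chars.isIn w pvRevAlpha

-- ===== PORT B =====
def pvLow (c : Char) : Int :=
  if 65 ≤ c.toNat ∧ c.toNat ≤ 90 then (c.toNat : Int) + 32 else (c.toNat : Int)

def pvCheck (a b c d : Int) : Bool :=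
  decide (97 ≤ a ∧ a ≤ 122 ∧ 97 ≤ d ∧ d ≤ 122 ∧
          b - a = c - b ∧ c - b = d - c ∧ (b - a = 1 ∨ b - a = -1))

def letter_sequence_alt (t : String) : Bool :=
  let cs : List Int := t.toList.map pvLow
  (PySem.List.pyRange 0 ((cs.length : Int) - 3) 1).any fun i =>
    pvCheck (PySem.List.pyGetD cs i 0) (PySem.List.pyGetD cs (i + 1) 0)
            (PySem.List.pyGetD cs (i + 2) 0) (PySem.List.pyGetD cs (i + 3) 0)

-- ===== PRECONDITION & SPEC =====
def Spec_letter_sequence (t : String) (out : Bool) : Prop := out = letter_sequence_alt t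
instance (t : String) (out : Bool) : Decidable (Spec_letter_sequence t out) := by unfold Spec_letter_sequence; infer_instance

-- ===== CLAIM (what is proved, stated in full; the proofs are below) =====
def Claim_equal_letter_sequence : Prop := ∀ (t : String), Dom_letter_sequence t → Spec_letter_sequence t (letter_sequence t)

-- ===== LEMMAS AND PROOFS =====

lemma pvRevAlpha_eq : pvRevAlpha = pvAlpha.reverse := by
  simp [pvRevAlpha, PySem.List.slice?_none_none_neg_one]

lemma char_of_toNat (c : Char) (n : Nat) (h : c.toNat = n) : c = Char.ofNat n := by
  rw [← h, Char.ofNat_toNat]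

lemma pvAlpha_code (j : Nat) (h : j < 26) : (pvAlpha.getD j 'a').toNat = 97 + j := by
  interval_cases j <;> decide

-- ascending 4-window characterisation of the substring test
lemma isIn4_alpha (a b c d : Char) :
    PySem.Chars.isIn [a, b, c, d] pvAlpha = true ↔
      97 ≤ a.toNat ∧ b.toNat = a.toNat + 1 ∧ c.toNat = a.toNat + 2 ∧
        d.toNat = a.toNat + 3 ∧ d.toNat ≤ 122 := by
  rw [PySem.Chars.isIn_iff_infix]
  constructor
  · rintro ⟨s, u, hsu⟩
    have hlen : s.length + 4 + u.length = 26 := by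
      have := congrArg List.length hsu
      simp [pvAlpha] at this
      omega
    have hj : s.length + 3 < 26 := by omega
    have hget : ∀ k : Nat, k < 4 → pvAlpha.getD (s.length + k) 'a' = [a, b, c, d].getD k 'a' := by
      intro k hk
      rw [← hsu, List.append_assoc,
          List.getD_append_right s _ 'a' _ (Nat.le_add_right s.length k), Nat.add_sub_cancel_left,
          List.getD_append _ u 'a' k (by simpa using hk)]
    have h0 := hget 0 (by omega); have h1 := hget 1 (by omega)
    have h2 := hget 2 (by omega); have h3 := hget 3 (by omega)
    rw [Nat.add_zero] at h0
    rw [show [a, b, c, d].getD 0 'a' = a from rfl] at h0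
    rw [show [a, b, c, d].getD 1 'a' = b from rfl] at h1
    rw [show [a, b, c, d].getD 2 'a' = c from rfl] at h2
    rw [show [a, b, c, d].getD 3 'a' = d from rfl] at h3
    have c0 := pvAlpha_code s.length (by omega)
    have c1 := pvAlpha_code (s.length + 1) (by omega)
    have c2 := pvAlpha_code (s.length + 2) (by omega)
    have c3 := pvAlpha_code (s.length + 3) (by omega)
    rw [h0] at c0; rw [h1] at c1; rw [h2] at c2; rw [h3] at c3
    omega
  · rintro ⟨h97, hb, hc, hd, h122⟩
    have ha : a = Char.ofNat a.toNat := char_of_toNat a _ rfl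
    have hb' : b = Char.ofNat (a.toNat + 1) := char_of_toNat b _ hb
    have hc' : c = Char.ofNat (a.toNat + 2) := char_of_toNat c _ hc
    have hd' : d = Char.ofNat (a.toNat + 3) := char_of_toNat d _ hd
    rw [ha, hb', hc', hd']
    have hle : a.toNat ≤ 119 := by omega
    rw [← PySem.Chars.isIn_iff_infix]
    interval_cases (a.toNat) <;> decide

lemma isIn4_rev (a b c d : Char) :
    PySem.Chars.isIn [a, b, c, d] pvRevAlpha = PySem.Chars.isIn [d, c, b, a] pvAlpha := by
  rw [Bool.eq_iff_iff, PySem.Chars.isIn_iff_infix, PySem.Chars.isIn_iff_infix, pvRevAlpha_eq]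
  constructor
  · intro h
    have : [d, c, b, a].reverse <:+: pvAlpha.reverse := by simpa using h
    exact List.reverse_infix.mp this
  · intro h
    have : [d, c, b, a].reverse <:+: pvAlpha.reverse := List.reverse_infix.mpr h
    simpa using this

lemma lowerChar_toNat (c : Char) :
    ((PySem.Chars.lowerChar c).toNat : Int) = pvLow c := by
  simp only [PySem.Chars.lowerChar, PySem.Chars.isupper, pvLow]
  by_cases h : 65 ≤ c.toNat ∧ c.toNat ≤ 90
  · have hA : 'A' ≤ c := Char.le_def.mpr (by exact h.1)
    have hZ : c ≤ 'Z' := Char.le_def.mpr (by exact h.2)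
    have hval : (Char.ofNat (c.toNat + 32)).toNat = c.toNat + 32 := by
      rw [Char.toNat_ofNat]
      simp [Nat.isValidChar]; omega
    simp [hA, hZ, h, hval]
  · have : ¬ ('A' ≤ c) ∨ ¬ (c ≤ 'Z') := by
      by_contra hcon
      push Not at hcon
      exact h ⟨Char.le_def.mp hcon.1, Char.le_def.mp hcon.2⟩
    rcases this with hA | hZ
    · simp [hA, h]
    · simp [hZ, h]

-- the per-window equivalence: A's lowercase-and-substring test equals B's ordinal check
lemma window_eq (a b c d : Char) :
    (PySem.Chars.isIn (PySem.Chars.lower [a, b, c, d]) pvAlpha ||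
      PySem.Chars.isIn (PySem.Chars.lower [a, b, c, d]) pvRevAlpha)
      = pvCheck (pvLow a) (pvLow b) (pvLow c) (pvLow d) := by
  have hlow : PySem.Chars.lower [a, b, c, d] =
      [PySem.Chars.lowerChar a, PySem.Chars.lowerChar b,
       PySem.Chars.lowerChar c, PySem.Chars.lowerChar d] := by
    simp [PySem.Chars.lower]
  rw [hlow, Bool.eq_iff_iff, Bool.or_eq_true, isIn4_rev, isIn4_alpha, isIn4_alpha]
  rw [← lowerChar_toNat a, ← lowerChar_toNat b, ← lowerChar_toNat c, ← lowerChar_toNat d]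
  simp only [pvCheck, decide_eq_true_eq]
  omega

lemma take4_drop (cs : List α) (j : Nat) (h : j + 3 < cs.length) :
    List.take 4 (List.drop j cs) =
      [cs[j]'(by omega), cs[j+1]'(by omega), cs[j+2]'(by omega), cs[j+3]'(by omega)] := by
  rw [List.drop_eq_getElem_cons (by omega : j < cs.length),
      List.drop_eq_getElem_cons (by omega : j + 1 < cs.length),
      List.drop_eq_getElem_cons (by omega : j + 2 < cs.length),
      List.drop_eq_getElem_cons (by omega : j + 3 < cs.length)]
  rfl

lemma getD_map_pvLow (cs : List Char) (k : Nat) (h : k < cs.length) :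
    (cs.map pvLow).getD k 0 = pvLow (cs[k]'h) := by
  rw [List.getD_eq_getElem _ _ (by simpa using h), List.getElem_map]

-- ===== VERDICT (by name: the statement is the Claim_ definition above) =====
theorem letter_sequence_spec : Claim_equal_letter_sequence := by
  intro t _
  unfold Spec_letter_sequence letter_sequence letter_sequence_alt
  simp only [List.length_map]
  apply PySem.List.any_congr_mem
  intro i hi
  rw [PySem.List.mem_pyRange_one] at hi
  obtain ⟨j, rfl⟩ := Int.eq_ofNat_of_zero_le hi.1
  have hj : j + 3 < t.toList.length := by omega
  have hslice : PySem.List.slice t.toList (some (j : Int)) (some ((j : Int) + 4)) =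
      List.take 4 (List.drop j t.toList) := by
    have : ((j : Int) + 4) = ((j : Int) + ((4 : Nat) : Int)) := by norm_cast
    rw [this, PySem.List.slice_natCast_add]
  simp only [hslice, take4_drop t.toList j hj]
  have e1 : ((j : Int) + 1) = (((j + 1 : Nat) : Int)) := by push_cast; ring
  have e2 : ((j : Int) + 2) = (((j + 2 : Nat) : Int)) := by push_cast; ring
  have e3 : ((j : Int) + 3) = (((j + 3 : Nat) : Int)) := by push_cast; ring
  rw [e1, e2, e3]
  simp only [PySem.List.pyGetD_natCast]
  rw [getD_map_pvLow _ j (by omega), getD_map_pvLow _ (j+1) (by omega),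
      getD_map_pvLow _ (j+2) (by omega), getD_map_pvLow _ (j+3) (by omega)]
  exact window_eq _ _ _ _
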